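-- pv_equiv track=rewrite | github.com/UditJain2622004/chat | backend/controllers/utils.py | get_latest_user_messages
-- ===== SOURCE A (Python) =====
-- def get_latest_user_messages(messages: list[dict]) -> list[dict]:
--     last_assistant_index = -1
--     for idx in range(len(messages) - 1, -1, -1):
--         try:
--             if isinstance(messages[idx], dict) and messages[idx].get('role') == 'assistant':
--                 last_assistant_index = idx
--                 break
--         except Exception:
--             continue
--
--     pending = messages[last_assistant_index + 1:] if last_assistant_index >= 0 else messages
--     new_user_messages = [m for m in pending if isinstance(m, dict) and m.get('role') == 'user']
--
--     # prepend timestamp to each message in the format of YYYY-MM-DD HH:MM:SS. Form frontend, timestamp is sent as follows - timestamp: new Date().toISOString()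
--     # for msg in new_user_messages:
--     #     msg['content'] = f"<timestamp>{msg['timestamp']}</timestamp>\n{msg['content']}"
--
--
--
--     return new_user_messages
-- ===== SOURCE B (Python) =====
-- def get_latest_user_messages(messages: list[dict]) -> list[dict]:
--     result = []
--     for m in messages:
--         if isinstance(m, dict) and m.get('role') == 'assistant':
--             result = []
--         elif isinstance(m, dict) and m.get('role') == 'user':
--             result.append(m)
--     return result
-- ===== Notes on version B (the rewrite author's own statement) =====
-- stated objective: simpler
-- what changed: Replaces the reverse index scan + slice + filter with a single forward pass that appends user messages to an accumulator and resets it whenever an assistant message is seen.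
import Mathlib
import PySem

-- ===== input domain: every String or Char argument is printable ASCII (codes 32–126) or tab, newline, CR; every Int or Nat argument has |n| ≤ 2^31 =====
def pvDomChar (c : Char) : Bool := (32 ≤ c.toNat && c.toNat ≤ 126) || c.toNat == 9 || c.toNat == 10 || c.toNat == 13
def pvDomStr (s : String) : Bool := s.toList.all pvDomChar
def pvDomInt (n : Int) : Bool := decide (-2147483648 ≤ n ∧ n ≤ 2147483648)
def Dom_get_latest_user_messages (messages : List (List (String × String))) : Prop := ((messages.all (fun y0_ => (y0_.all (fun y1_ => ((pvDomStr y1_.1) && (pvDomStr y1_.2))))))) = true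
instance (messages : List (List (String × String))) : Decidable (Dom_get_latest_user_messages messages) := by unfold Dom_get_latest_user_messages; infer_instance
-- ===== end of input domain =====

-- B replaces A's reverse index scan + slice + filter with a single forward pass
-- keeping an accumulator that is reset at every assistant message (objective: simpler).


-- ===== PORT A =====
-- A's reverse `for idx in range(len(messages)-1,-1,-1): … break` loop: first index in the
-- range list whose message has role 'assistant', else -1 (the try/except is unreachable here).
def pvScanA (msgs : List (List (String × String))) : List Int → Int
  | [] => -1
  | i :: rest =>
    if (PySem.List.pyGet? msgs i).any (fun m => PySem.Dict.get? (PySem.Dict.mk m) "role" == some "assistant")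
    then i else pvScanA msgs rest

def get_latest_user_messages (messages : List (List (String × String))) : List (List (String × String)) :=
  let last_assistant_index :=
    pvScanA messages (PySem.List.pyRange ((messages.length : Int) - 1) (-1) (-1))
  let pending :=
    if last_assistant_index ≥ 0 then
      PySem.List.slice messages (some (last_assistant_index + 1)) none
    else messages
  pending.filter (fun m => PySem.Dict.get? (PySem.Dict.mk m) "role" == some "user")

-- ===== PORT B =====
def get_latest_user_messages_alt (messages : List (List (String × String))) : List (List (String × String)) :=
  messages.foldl
    (fun result m =>
      if PySem.Dict.get? (PySem.Dict.mk m) "role" == some "assistant" then []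
      else if PySem.Dict.get? (PySem.Dict.mk m) "role" == some "user" then result ++ [m]
      else result)
    []

-- ===== PRECONDITION & SPEC =====
def Spec_get_latest_user_messages (messages : List (List (String × String))) (out : List (List (String × String))) : Prop := out = get_latest_user_messages_alt messages
instance (messages : List (List (String × String))) (out : List (List (String × String))) : Decidable (Spec_get_latest_user_messages messages out) := by unfold Spec_get_latest_user_messages; infer_instance

-- ===== CLAIM (what is proved, stated in full; the proofs are below) =====
def Claim_equal_get_latest_user_messages : Prop := ∀ (messages : List (List (String × String))), Dom_get_latest_user_messages messages → Spec_get_latest_user_messages messages (get_latest_user_messages messages)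

-- ===== LEMMAS AND PROOFS =====

theorem pvRange_desc (n : Nat) :
    PySem.List.pyRange ((n : Int) - 1) (-1) (-1) = ((List.range n).reverse).map (fun k : Nat => (k : Int)) := by
  rcases Nat.eq_zero_or_pos n with h | h
  · subst h; rfl
  · have hc : (-1 : Int) < (n : Int) - 1 := by omega
    simp only [PySem.List.pyRange]
    rw [if_neg (by norm_num), if_neg (by norm_num), if_pos hc]
    have hcount : ((((n : Int) - 1) - (-1) + -(-1) - 1) / -(-1)).toNat = n := by
      norm_num
    rw [hcount]
    apply List.ext_getElem
    · simp
    · intro j h1 h2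
      have hj : j < n := by simpa using h1
      rw [List.getElem_map, List.getElem_map, List.getElem_reverse, List.getElem_range, List.getElem_range]
      simp only [List.length_range]
      omega

theorem pvScanA_snoc (msgs : List (List (String × String))) (m : List (String × String))
    (l : List Nat) (hl : ∀ i ∈ l, i < msgs.length) :
    pvScanA (msgs ++ [m]) (l.map (fun k : Nat => (k : Int))) = pvScanA msgs (l.map (fun k : Nat => (k : Int))) := by
  induction l with
  | nil => rfl
  | cons i rest ih =>
    have hi : i < msgs.length := hl i (by simp)
    simp only [List.map_cons, pvScanA, PySem.List.pyGet?_natCast,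
      List.getElem?_append_left hi]
    rw [ih (fun j hj => hl j (by simp [hj]))]

theorem pvScanA_mem (msgs : List (List (String × String))) (l : List Int) :
    pvScanA msgs l = -1 ∨ pvScanA msgs l ∈ l := by
  induction l with
  | nil => left; rfl
  | cons i rest ih =>
    simp only [pvScanA]
    split
    · right; simp
    · rcases ih with h | h
      · left; exact h
      · right; simp [h]

theorem pv_main (messages : List (List (String × String))) :
    get_latest_user_messages messages = get_latest_user_messages_alt messages := by
  induction messages using List.reverseRecOn with
  | nil => rfl
  | append_singleton msgs m ih =>
    have hlen : (((msgs ++ [m]).length : Int) - 1) = (((msgs.length + 1 : Nat) : Int) - 1) := by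
      simp
    have hrange : PySem.List.pyRange (((msgs ++ [m]).length : Int) - 1) (-1) (-1)
        = (msgs.length : Int) :: ((List.range msgs.length).reverse).map (fun k : Nat => (k : Int)) := by
      rw [hlen, pvRange_desc]
      simp [List.range_succ]
    have hget : PySem.List.pyGet? (msgs ++ [m]) (msgs.length : Int) = some m := by
      rw [PySem.List.pyGet?_natCast]
      simp
    have hfoldB : get_latest_user_messages_alt (msgs ++ [m])
        = (if PySem.Dict.get? (PySem.Dict.mk m) "role" == some "assistant" then []
           else if PySem.Dict.get? (PySem.Dict.mk m) "role" == some "user" then get_latest_user_messages_alt msgs ++ [m]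
           else get_latest_user_messages_alt msgs) := by
      simp only [get_latest_user_messages_alt, List.foldl_append, List.foldl_cons, List.foldl_nil]
    by_cases ha : (PySem.Dict.get? (PySem.Dict.mk m) "role" == some "assistant") = true
    · -- m is an assistant message
      unfold get_latest_user_messages
      rw [hrange]
      simp only [pvScanA, hget, Option.any_some, ha, if_pos]
      have hslice : PySem.List.slice (msgs ++ [m]) (some ((msgs.length : Int) + 1)) none = [] := by
        rw [PySem.List.slice_from (msgs ++ [m]) (by positivity)]
        have : ((msgs.length : Int) + 1).toNat = msgs.length + 1 := by omega
        simp [this]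
      rw [if_pos (by positivity), hslice, hfoldB, if_pos ha]
      rfl
    · -- m is not an assistant message
      unfold get_latest_user_messages
      rw [hrange]
      simp only [pvScanA, hget, Option.any_some, ha, Bool.false_eq_true, if_false]
      rw [pvScanA_snoc msgs m (List.range msgs.length).reverse (by simp)]
      set L := pvScanA msgs (((List.range msgs.length).reverse).map (fun k : Nat => (k : Int))) with hL
      have hAm : get_latest_user_messages msgs
          = (if L ≥ 0 then PySem.List.slice msgs (some (L + 1)) none else msgs).filter
              (fun m => PySem.Dict.get? (PySem.Dict.mk m) "role" == some "user") := by
        unfold get_latest_user_messages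
        rw [pvRange_desc msgs.length, ← hL]
      have hcase := pvScanA_mem msgs (((List.range msgs.length).reverse).map (fun k : Nat => (k : Int)))
      rw [← hL] at hcase
      by_cases hge : L ≥ 0
      · obtain ⟨k, hk, hkL⟩ : ∃ k : Nat, k < msgs.length ∧ L = (k : Int) := by
          rcases hcase with h | h
          · omega
          · simp only [List.mem_map, List.mem_reverse, List.mem_range] at h
            obtain ⟨k, hk, hkL⟩ := h
            exact ⟨k, hk, hkL.symm⟩
        have hdrop : PySem.List.slice (msgs ++ [m]) (some (L + 1)) none
            = PySem.List.slice msgs (some (L + 1)) none ++ [m] := by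
          rw [PySem.List.slice_from _ (by omega), PySem.List.slice_from _ (by omega)]
          have ht : (L + 1).toNat = k + 1 := by omega
          rw [ht, List.drop_append_of_le_length (by omega)]
        rw [if_pos hge, hdrop, List.filter_append, hfoldB, if_neg ha, ← ih, hAm, if_pos hge]
        by_cases hu : (PySem.Dict.get? (PySem.Dict.mk m) "role" == some "user") = true
        · simp [hu]
        · simp [hu]
      · rw [if_neg hge, List.filter_append, hfoldB, if_neg ha, ← ih, hAm, if_neg hge]
        by_cases hu : (PySem.Dict.get? (PySem.Dict.mk m) "role" == some "user") = true
        · simp [hu]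
        · simp [hu]

-- ===== VERDICT (by name: the statement is the Claim_ definition above) =====
theorem get_latest_user_messages_spec : Claim_equal_get_latest_user_messages := by
  intro messages _
  unfold Spec_get_latest_user_messages
  exact pv_main messages
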